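-- pv_equiv track=rewrite | github.com/eunjungchoi/algorithm | array/mock_max_distance_to_closest.py | maxDistToClosest1
-- ===== SOURCE A (Python) =====
-- from typing import List
--
-- def maxDistToClosest1(seats: List[int]) -> int:
--     max_ = 1
--
--     for i, occupied in enumerate(seats):
--         if not occupied:
--             left = right = i
--             while 0 <= left and not seats[left] and right <= len(seats) - 1 and not seats[right]:
--                 left = left - 1 if left > 0 else left
--                 right = right + 1 if right < len(seats) - 1 else right
--
--             max_ = max(max_, i - left, right - i)
--
--     return max_
-- ===== SOURCE B (Python) =====
-- from typing import List
--
-- def maxDistToClosest1(seats: List[int]) -> int: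
--     # Two linear passes: distance to nearest occupied seat on the left, then on
--     # the right; n acts as "no occupied seat on this side yet" sentinel.
--     n = len(seats)
--     left = []
--     d = n
--     for s in seats:
--         d = 0 if s else d + 1
--         left.append(d)
--     best = 1
--     d = n
--     for s, l in reversed(list(zip(seats, left))):
--         d = 0 if s else d + 1
--         if not s:
--             best = max(best, min(l, d))
--     return best
-- ===== Notes on version B (the rewrite author's own statement) =====
-- stated objective: alternative
-- what changed: A expands left and right outward from every empty seat until the expansion meets an occupied seat; B instead makes two linear passes over the seat list computing, for each seat, the distance to the nearest occupied seat on the left and on the right (with len(seats) as 'no seat on this side' sentinel) and takes the running max of the per-seat minima; this avoids A's nested expansion loop (quadratic on long runs of empty seats), though on a timing run's input family (few zeros) the measured times are comparable.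
-- outside the precondition, e.g. on maxDistToClosest1([0, 0]): A does not finish within the time limit, B returns 3
import Mathlib
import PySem

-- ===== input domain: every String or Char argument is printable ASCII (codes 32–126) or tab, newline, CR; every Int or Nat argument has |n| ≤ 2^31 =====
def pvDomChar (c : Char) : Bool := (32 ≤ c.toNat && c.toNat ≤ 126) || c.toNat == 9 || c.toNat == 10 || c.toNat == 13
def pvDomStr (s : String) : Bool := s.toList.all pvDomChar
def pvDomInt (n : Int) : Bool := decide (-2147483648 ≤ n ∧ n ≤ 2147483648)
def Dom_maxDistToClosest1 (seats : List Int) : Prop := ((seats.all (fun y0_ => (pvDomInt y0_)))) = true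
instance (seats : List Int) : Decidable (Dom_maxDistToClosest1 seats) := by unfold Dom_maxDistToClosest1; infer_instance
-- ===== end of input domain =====

-- B replaces A's per-empty-seat two-sided expansion with two linear passes over the seat
-- list (distance to the nearest occupied seat on each side), a different algorithm.

-- ===== PORT A =====
-- the 'while' condition: 0 <= left and not seats[left] and right <= len(seats)-1 and not seats[right]
def pvACond (seats : List Int) (l r : Int) : Bool :=
  decide (0 ≤ l) && (PySem.List.pyGet? seats l == some 0) &&
    decide (r ≤ (seats.length : Int) - 1) && (PySem.List.pyGet? seats r == some 0)

-- the inner 'while' loop (fuel-bounded; on every input A terminates on, the fuel suffices)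
def pvALoop (seats : List Int) : Nat → Int → Int → Int × Int
  | 0, l, r => (l, r)
  | fuel+1, l, r =>
    if pvACond seats l r then
      pvALoop seats fuel (if l > 0 then l - 1 else l)
        (if r < (seats.length : Int) - 1 then r + 1 else r)
    else (l, r)

def maxDistToClosest1 (seats : List Int) : Int :=
  (PySem.List.enumerate seats).foldl (fun max_ p =>
    if p.2 = 0 then
      let lr := pvALoop seats (seats.length + 1) p.1 p.1
      max (max max_ (p.1 - lr.1)) (lr.2 - p.1)
    else max_) 1

-- ===== PORT B =====
def maxDistToClosest1_alt (seats : List Int) : Int :=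
  let n : Int := seats.length
  let left := (seats.foldl (fun (acc : List Int × Int) s =>
      let d := if s ≠ 0 then 0 else acc.2 + 1
      (acc.1 ++ [d], d)) ([], n)).1
  ((seats.zip left).reverse.foldl (fun (st : Int × Int) p =>
      let d := if p.1 ≠ 0 then 0 else st.2 + 1
      (if p.1 = 0 then max st.1 (min p.2 d) else st.1, d)) (1, n)).1

-- ===== PRECONDITION & SPEC =====
-- Pre_ excludes exactly the nonempty all-zero lists: on those A's inner 'while' loops forever
-- (left sticks at 0, right sticks at len-1, both seats empty), so A never returns.
def Pre_maxDistToClosest1 (seats : List Int) : Prop :=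
  seats = [] ∨ seats.any (fun s => s ≠ 0) = true
instance (seats : List Int) : Decidable (Pre_maxDistToClosest1 seats) := by
  unfold Pre_maxDistToClosest1; infer_instance

def pvWitness_maxDistToClosest1 : List Int := [1, 0, 0, 0, 1, 0]

def Spec_maxDistToClosest1 (seats : List Int) (out : Int) : Prop := out = maxDistToClosest1_alt seats
instance (seats : List Int) (out : Int) : Decidable (Spec_maxDistToClosest1 seats out) := by unfold Spec_maxDistToClosest1; infer_instance

-- ===== CLAIM (what is proved, stated in full; the proofs are below) =====
def Claim_equal_maxDistToClosest1 : Prop := ∀ (seats : List Int), Dom_maxDistToClosest1 seats → Pre_maxDistToClosest1 seats → Spec_maxDistToClosest1 seats (maxDistToClosest1 seats)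

-- ===== LEMMAS AND PROOFS =====

-- the d-update of B's scans, and the scan value after consuming a list
def pvDStep (d s : Int) : Int := if s ≠ 0 then 0 else d + 1
def pvDAfter (d0 : Int) (l : List Int) : Int := l.foldl pvDStep d0

-- distance (in B's sentinel convention) from index i to the nearest occupied seat at ≤ i / ≥ i
def pvLd (seats : List Int) (i : Nat) : Int := pvDAfter (seats.length) (seats.take (i+1))
def pvRd (seats : List Int) (i : Nat) : Int := pvDAfter (seats.length) (seats.reverse.take (seats.length - i))
def pvVal (seats : List Int) (i : Nat) : Int := min (pvLd seats i) (pvRd seats i)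

-- the common max-accumulating step both programs reduce to
def pvStep (seats : List Int) (b : Int) (i : Nat) : Int :=
  if seats.getD i 0 = 0 then max b (pvVal seats i) else b

-- basic facts about the scan value
theorem pvDAfter_append (d0 : Int) (l : List Int) (x : Int) :
    pvDAfter d0 (l ++ [x]) = pvDStep (pvDAfter d0 l) x := by
  simp [pvDAfter, List.foldl_append]

theorem pvDAfter_nonneg (d0 : Int) (l : List Int) (h : 0 ≤ d0) : 0 ≤ pvDAfter d0 l := by
  induction l generalizing d0 with
  | nil => exact h
  | cons s tl ih =>
      simp only [pvDAfter, List.foldl_cons]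
      refine ih _ ?_
      unfold pvDStep
      split <;> omega

theorem pvLd_nonneg (seats : List Int) (i : Nat) : 0 ≤ pvLd seats i :=
  pvDAfter_nonneg _ _ (by positivity)

theorem pvLd_zero (seats : List Int) (h : 0 < seats.length) :
    pvLd seats 0 = pvDStep (seats.length : Int) (seats.getD 0 0) := by
  rw [pvLd, List.take_add_one, List.take_zero, List.getElem?_eq_getElem h,
    List.getD_eq_getElem _ _ h]
  simp [pvDAfter]

theorem pvLd_succ (seats : List Int) (i : Nat) (h : i + 1 < seats.length) :
    pvLd seats (i+1) = pvDStep (pvLd seats i) (seats.getD (i+1) 0) := by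
  have h2 : seats.take (i+1+1) = seats.take (i+1) ++ [seats[i+1]] := by
    rw [List.take_add_one (i := i+1), List.getElem?_eq_getElem h]
    rfl
  rw [pvLd, h2, pvDAfter_append, List.getD_eq_getElem _ _ h, pvLd]

-- positions strictly closer than pvLd on the left are empty
theorem pvLd_empties (seats : List Int) :
    ∀ i, i < seats.length → ∀ t : Nat, (t : Int) < pvLd seats i → t ≤ i →
      seats.getD (i - t) 0 = 0 := by
  intro i
  induction i with
  | zero =>
      intro hi t ht hti
      interval_cases t
      rw [pvLd_zero seats hi] at ht
      unfold pvDStep at ht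
      split at ht
      · omega
      · rename_i hz
        simpa using hz
  | succ i ih =>
      intro hi t ht hti
      rw [pvLd_succ seats i hi] at ht
      unfold pvDStep at ht
      split at ht
      · omega
      · rename_i hz
        rcases Nat.eq_zero_or_pos t with rfl | htpos
        · simpa using (em (seats.getD (i+1) 0 = 0)).resolve_right hz
        · have := ih (by omega) (t - 1) (by omega) (by omega)
          have : seats.getD (i - (t-1)) 0 = 0 := this
          have heq : i + 1 - t = i - (t - 1) := by omega
          rwa [heq]

-- the seat exactly pvLd away on the left is occupied (when it exists)
theorem pvLd_hit (seats : List Int) :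
    ∀ i, i < seats.length → ∀ t : Nat, (t : Int) = pvLd seats i → t ≤ i →
      seats.getD (i - t) 0 ≠ 0 := by
  intro i
  induction i with
  | zero =>
      intro hi t ht hti
      interval_cases t
      rw [pvLd_zero seats hi] at ht
      unfold pvDStep at ht
      split at ht
      · simpa using ht ▸ ‹seats.getD 0 0 ≠ 0›
      · omega
  | succ i ih =>
      intro hi t ht hti
      rw [pvLd_succ seats i hi] at ht
      unfold pvDStep at ht
      split at ht
      · rename_i hz
        have : t = 0 := by omega
        subst this
        simpa using hz
      · rcases Nat.eq_zero_or_pos t with rfl | htpos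
        · have := pvLd_nonneg seats i; omega
        · have := ih (by omega) (t - 1) (by omega) (by omega)
          have heq : i + 1 - t = i - (t - 1) := by omega
          rwa [heq]

-- if pvLd exceeds i, the whole prefix is empty and pvLd has its sentinel value
theorem pvLd_big (seats : List Int) :
    ∀ i, i < seats.length → (i : Int) < pvLd seats i →
      pvLd seats i = (seats.length : Int) + 1 + i := by
  intro i
  induction i with
  | zero =>
      intro hi ht
      rw [pvLd_zero seats hi] at ht ⊢
      unfold pvDStep at ht ⊢
      split at ht
      · omega
      · simp_all
  | succ i ih =>
      intro hi ht
      rw [pvLd_succ seats i hi] at ht ⊢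
      unfold pvDStep at ht ⊢
      split at ht
      · omega
      · rename_i hz
        simp only [if_neg hz]
        have := ih (by omega) (by omega)
        push_cast at this ⊢
        omega

-- an occupied seat at k ≤ i bounds pvLd
theorem pvLd_le (seats : List Int) :
    ∀ i, i < seats.length → ∀ k : Nat, k ≤ i → seats.getD k 0 ≠ 0 →
      pvLd seats i ≤ (i : Int) - k := by
  intro i
  induction i with
  | zero =>
      intro hi k hk hocc
      interval_cases k
      rw [pvLd_zero seats hi]
      unfold pvDStep
      rw [if_pos hocc]
      simp
  | succ i ih =>
      intro hi k hk hocc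
      rw [pvLd_succ seats i hi]
      unfold pvDStep
      split
      · push_cast; omega
      · rename_i hz
        have hk' : k ≤ i := by
          rcases Nat.lt_or_ge k (i+1) with h | h
          · omega
          · exact absurd (by omega : k = i + 1) (fun he => hz (he ▸ hocc) |>.elim)
        have := ih (by omega) k hk' hocc
        push_cast at this ⊢
        omega

theorem pvRd_eq (seats : List Int) (i : Nat) (hi : i < seats.length) :
    pvRd seats i = pvLd seats.reverse (seats.length - 1 - i) := by
  rw [pvRd, pvLd, List.length_reverse]
  congr 2
  omega

theorem pvRd_nonneg (seats : List Int) (i : Nat) : 0 ≤ pvRd seats i :=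
  pvDAfter_nonneg _ _ (by positivity)

theorem pv_getD_reverse {α : Type} (l : List α) (d : α) (k : Nat) (hk : k < l.length) :
    l.reverse.getD k d = l.getD (l.length - 1 - k) d := by
  rw [List.getD_eq_getElem _ _ (by simpa using hk), List.getD_eq_getElem _ _ (by omega),
    List.getElem_reverse]

theorem pvRd_empties (seats : List Int) (i : Nat) (hi : i < seats.length) :
    ∀ t : Nat, (t : Int) < pvRd seats i → t ≤ seats.length - 1 - i →
      seats.getD (i + t) 0 = 0 := by
  intro t ht hti
  rw [pvRd_eq seats i hi] at ht
  have h := pvLd_empties seats.reverse (seats.length - 1 - i) (by simp; omega) t ht (by omega)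
  rw [pv_getD_reverse seats 0 _ (by omega)] at h
  have heq : seats.length - 1 - (seats.length - 1 - i - t) = i + t := by omega
  rwa [heq] at h

theorem pvRd_hit (seats : List Int) (i : Nat) (hi : i < seats.length) :
    ∀ t : Nat, (t : Int) = pvRd seats i → t ≤ seats.length - 1 - i →
      seats.getD (i + t) 0 ≠ 0 := by
  intro t ht hti
  rw [pvRd_eq seats i hi] at ht
  have h := pvLd_hit seats.reverse (seats.length - 1 - i) (by simp; omega) t ht (by omega)
  rw [pv_getD_reverse seats 0 _ (by omega)] at h
  have heq : seats.length - 1 - (seats.length - 1 - i - t) = i + t := by omega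
  rwa [heq] at h

theorem pvRd_big (seats : List Int) (i : Nat) (hi : i < seats.length) :
    ((seats.length - 1 - i : Nat) : Int) < pvRd seats i →
      pvRd seats i = (seats.length : Int) + 1 + ((seats.length - 1 - i : Nat) : Int) := by
  intro ht
  rw [pvRd_eq seats i hi] at ht ⊢
  have h := pvLd_big seats.reverse (seats.length - 1 - i) (by simp; omega) ht
  simpa using h

theorem pvRd_le (seats : List Int) (i : Nat) (hi : i < seats.length) :
    ∀ k : Nat, i ≤ k → k < seats.length → seats.getD k 0 ≠ 0 →
      pvRd seats i ≤ (k : Int) - i := by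
  intro k hik hk hocc
  rw [pvRd_eq seats i hi]
  have hocc' : seats.reverse.getD (seats.length - 1 - k) 0 ≠ 0 := by
    rw [pv_getD_reverse seats 0 _ (by omega)]
    have heq : seats.length - 1 - (seats.length - 1 - k) = k := by omega
    rwa [heq]
  have h := pvLd_le seats.reverse (seats.length - 1 - i) (by simp; omega)
    (seats.length - 1 - k) (by omega) hocc'
  have h1 : ((seats.length - 1 - i : Nat) : Int) = (seats.length : Int) - 1 - i := by omega
  have h2 : ((seats.length - 1 - k : Nat) : Int) = (seats.length : Int) - 1 - k := by omega
  rw [h1, h2] at h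
  omega

theorem pv_hd (seats : List Int) (i : Nat) (hi : i < seats.length)
    (k : Nat) (hk : k < seats.length) (hocc : seats.getD k 0 ≠ 0) :
    pvLd seats i ≤ (i : Int) ∨ pvRd seats i ≤ ((seats.length - 1 - i : Nat) : Int) := by
  rcases Nat.lt_or_ge i k with h | h
  · right
    have := pvRd_le seats i hi k (by omega) hk hocc
    omega
  · left
    have := pvLd_le seats i hi k h hocc
    omega

theorem pv_pyGet (seats : List Int) (k : Nat) (hk : k < seats.length) :
    PySem.List.pyGet? seats (k : Int) = some (seats.getD k 0) := by
  rw [List.getD_eq_getElem _ _ hk]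
  simp [PySem.List.pyGet?, PySem.List.pyIdx?, hk]

theorem pvALoop_eval (seats : List Int) (i : Nat) (hi : i < seats.length)
    (hd : pvLd seats i ≤ (i : Int) ∨ pvRd seats i ≤ ((seats.length - 1 - i : Nat) : Int)) :
    ∀ (fuel t : Nat), t ≤ (min (pvLd seats i) (pvRd seats i)).toNat →
      (min (pvLd seats i) (pvRd seats i)).toNat ≤ t + fuel →
      pvALoop seats fuel (if t ≤ i then (i : Int) - t else 0)
          (if t ≤ seats.length - 1 - i then (i : Int) + t else (seats.length : Int) - 1)
        = (if (min (pvLd seats i) (pvRd seats i)).toNat ≤ i then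
             (i : Int) - (min (pvLd seats i) (pvRd seats i)).toNat else 0,
           if (min (pvLd seats i) (pvRd seats i)).toNat ≤ seats.length - 1 - i then
             (i : Int) + (min (pvLd seats i) (pvRd seats i)).toNat else (seats.length : Int) - 1) := by
  have hLd0 := pvLd_nonneg seats i
  have hRd0 := pvRd_nonneg seats i
  have hTle : ((min (pvLd seats i) (pvRd seats i)).toNat : Int)
      = min (pvLd seats i) (pvRd seats i) :=
    Int.toNat_of_nonneg (le_min hLd0 hRd0)
  have hcase : (((min (pvLd seats i) (pvRd seats i)).toNat : Int) = pvLd seats i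
        ∧ (min (pvLd seats i) (pvRd seats i)).toNat ≤ i)
      ∨ (((min (pvLd seats i) (pvRd seats i)).toNat : Int) = pvRd seats i
        ∧ (min (pvLd seats i) (pvRd seats i)).toNat ≤ seats.length - 1 - i) := by
    rcases le_total (pvLd seats i) (pvRd seats i) with hle | hle
    · left
      have hL : pvLd seats i ≤ (i : Int) := by
        by_contra hbig
        have h1 := pvLd_big seats i hi (by omega)
        rcases hd with h | h
        · omega
        · omega
      have hm : min (pvLd seats i) (pvRd seats i) = pvLd seats i := min_eq_left hle
      rw [hm] at hTle ⊢
      exact ⟨hTle, by omega⟩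
    · right
      have hR : pvRd seats i ≤ ((seats.length - 1 - i : Nat) : Int) := by
        by_contra hbig
        have h1 := pvRd_big seats i hi (by omega)
        rcases hd with h | h
        · omega
        · omega
      have hm : min (pvLd seats i) (pvRd seats i) = pvRd seats i := min_eq_right hle
      rw [hm] at hTle ⊢
      exact ⟨hTle, by omega⟩
  intro fuel
  induction fuel with
  | zero =>
      intro t h1 h2
      have ht : t = (min (pvLd seats i) (pvRd seats i)).toNat := by omega
      subst ht
      rfl
  | succ fuel ih =>
      intro t h1 h2
      rcases eq_or_lt_of_le h1 with heq | hlt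
      · -- t = TN : the loop's condition is now false; it exits with the current state
        have hcond : pvACond seats (if t ≤ i then (i : Int) - t else 0)
            (if t ≤ seats.length - 1 - i then (i : Int) + t else (seats.length : Int) - 1)
            = false := by
          rcases hcase with ⟨hv, hb⟩ | ⟨hv, hb⟩
          · have hv' : (t : Int) = pvLd seats i := by rw [heq]; exact hv
            have hb' : t ≤ i := by rw [heq]; exact hb
            have hocc := pvLd_hit seats i hi t hv' hb'
            have hL : (if t ≤ i then (i : Int) - t else 0) = ((i - t : Nat) : Int) := by
              rw [if_pos hb']; omega
            unfold pvACond
            rw [hL, pv_pyGet seats (i - t) (by omega)]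
            simp_all
          · have hv' : (t : Int) = pvRd seats i := by rw [heq]; exact hv
            have hb' : t ≤ seats.length - 1 - i := by rw [heq]; exact hb
            have hocc := pvRd_hit seats i hi t hv' hb'
            have hR : (if t ≤ seats.length - 1 - i then (i : Int) + t
                else (seats.length : Int) - 1) = ((i + t : Nat) : Int) := by
              rw [if_pos hb']; omega
            unfold pvACond
            rw [hR, pv_pyGet seats (i + t) (by omega)]
            simp_all
        simp only [pvALoop, hcond, Bool.false_eq_true, if_false]
        rw [heq]
      · -- t < TN : the condition holds and the loop steps
        have hmin1 := min_le_left (pvLd seats i) (pvRd seats i)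
        have hmin2 := min_le_right (pvLd seats i) (pvRd seats i)
        have hlL : (t : Int) < pvLd seats i := by omega
        have hlR : (t : Int) < pvRd seats i := by omega
        have hL : PySem.List.pyGet? seats (if t ≤ i then (i : Int) - t else 0) = some 0 := by
          by_cases hti : t ≤ i
          · have h0 := pvLd_empties seats i hi t hlL hti
            have he : (if t ≤ i then (i : Int) - t else 0) = ((i - t : Nat) : Int) := by
              rw [if_pos hti]; omega
            rw [he, pv_pyGet seats (i - t) (by omega), h0]
          · have h0 := pvLd_empties seats i hi i (by omega) (le_refl i)
            have he : (if t ≤ i then (i : Int) - t else 0) = ((0 : Nat) : Int) := by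
              rw [if_neg hti]; rfl
            rw [he, pv_pyGet seats 0 (by omega)]
            simpa using h0
        have hR : PySem.List.pyGet? seats (if t ≤ seats.length - 1 - i then (i : Int) + t
            else (seats.length : Int) - 1) = some 0 := by
          by_cases hti : t ≤ seats.length - 1 - i
          · have h0 := pvRd_empties seats i hi t hlR hti
            have he : (if t ≤ seats.length - 1 - i then (i : Int) + t
                else (seats.length : Int) - 1) = ((i + t : Nat) : Int) := by
              rw [if_pos hti]; omega
            rw [he, pv_pyGet seats (i + t) (by omega), h0]
          · have h0 := pvRd_empties seats i hi (seats.length - 1 - i) (by omega) (le_refl _)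
            have he : (if t ≤ seats.length - 1 - i then (i : Int) + t
                else (seats.length : Int) - 1) = ((seats.length - 1 : Nat) : Int) := by
              rw [if_neg hti]; omega
            rw [he, pv_pyGet seats (seats.length - 1) (by omega)]
            have heq2 : i + (seats.length - 1 - i) = seats.length - 1 := by omega
            rw [heq2] at h0
            rw [h0]
        have hcond : pvACond seats (if t ≤ i then (i : Int) - t else 0)
            (if t ≤ seats.length - 1 - i then (i : Int) + t else (seats.length : Int) - 1)
            = true := by
          unfold pvACond
          rw [hL, hR]
          have hb1 : (0 : Int) ≤ (if t ≤ i then (i : Int) - t else 0) := by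
            split <;> omega
          have hb2 : (if t ≤ seats.length - 1 - i then (i : Int) + t
              else (seats.length : Int) - 1) ≤ (seats.length : Int) - 1 := by
            split <;> omega
          simp [hb1, hb2]
        simp only [pvALoop, hcond, if_true]
        have hL' : (if (if t ≤ i then (i : Int) - t else 0) > 0
            then (if t ≤ i then (i : Int) - t else 0) - 1
            else (if t ≤ i then (i : Int) - t else 0))
            = (if t + 1 ≤ i then (i : Int) - (t + 1 : Nat) else 0) := by
          split_ifs <;> push_cast <;> omega
        have hR' : (if (if t ≤ seats.length - 1 - i then (i : Int) + t
              else (seats.length : Int) - 1) < (seats.length : Int) - 1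
            then (if t ≤ seats.length - 1 - i then (i : Int) + t
              else (seats.length : Int) - 1) + 1
            else (if t ≤ seats.length - 1 - i then (i : Int) + t
              else (seats.length : Int) - 1))
            = (if t + 1 ≤ seats.length - 1 - i then (i : Int) + (t + 1 : Nat)
              else (seats.length : Int) - 1) := by
          have hil : (i : Int) < (seats.length : Int) := by exact_mod_cast hi
          split_ifs <;> push_cast at * <;> omega
        rw [hL', hR']
        exact ih (t + 1) (by omega) (by omega)

theorem pv_contrib (seats : List Int) (i : Nat) (hi : i < seats.length)
    (hd : pvLd seats i ≤ (i : Int) ∨ pvRd seats i ≤ ((seats.length - 1 - i : Nat) : Int))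
    (m : Int) :
    (if seats.getD i 0 = 0 then
        max (max m ((i : Int) - (pvALoop seats (seats.length + 1) (i : Int) (i : Int)).1))
          ((pvALoop seats (seats.length + 1) (i : Int) (i : Int)).2 - (i : Int))
      else m) = pvStep seats m i := by
  unfold pvStep
  by_cases h0 : seats.getD i 0 = 0
  · rw [if_pos h0, if_pos h0]
    have hLd0 := pvLd_nonneg seats i
    have hRd0 := pvRd_nonneg seats i
    have hmin1 := min_le_left (pvLd seats i) (pvRd seats i)
    have hmin2 := min_le_right (pvLd seats i) (pvRd seats i)
    have hTle : ((min (pvLd seats i) (pvRd seats i)).toNat : Int)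
        = min (pvLd seats i) (pvRd seats i) :=
      Int.toNat_of_nonneg (le_min hLd0 hRd0)
    have hloop := pvALoop_eval seats i hi hd (seats.length + 1) 0 (by omega) (by omega)
    simp only [Nat.zero_le, if_true, Nat.cast_zero, sub_zero, add_zero] at hloop
    have hfst : (pvALoop seats (seats.length + 1) (i : Int) (i : Int)).1
        = (if (min (pvLd seats i) (pvRd seats i)).toNat ≤ i then
            (i : Int) - ((min (pvLd seats i) (pvRd seats i)).toNat : Int) else 0) := by
      rw [hloop]
    have hsnd : (pvALoop seats (seats.length + 1) (i : Int) (i : Int)).2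
        = (if (min (pvLd seats i) (pvRd seats i)).toNat ≤ seats.length - 1 - i then
            (i : Int) + ((min (pvLd seats i) (pvRd seats i)).toNat : Int)
          else (seats.length : Int) - 1) := by
      rw [hloop]
    rw [hfst, hsnd, pvVal, max_assoc]
    congr 1
    conv_rhs => rw [← hTle]
    by_cases hc1 : (min (pvLd seats i) (pvRd seats i)).toNat ≤ i <;>
      by_cases hc2 : (min (pvLd seats i) (pvRd seats i)).toNat ≤ seats.length - 1 - i
    · rw [if_pos hc1, if_pos hc2]
      simp
    · rw [if_pos hc1, if_neg hc2]
      rw [max_eq_left (by omega)]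
      omega
    · rw [if_neg hc1, if_pos hc2]
      rw [max_eq_right (by omega)]
      omega
    · exfalso
      rcases hd with h | h <;> omega
  · rw [if_neg h0, if_neg h0]

theorem pvA_eq_fold (seats : List Int)
    (k : Nat) (hk : k < seats.length) (hocc : seats.getD k 0 ≠ 0) :
    maxDistToClosest1 seats = (List.range seats.length).foldl (pvStep seats) 1 := by
  unfold maxDistToClosest1
  rw [PySem.List.enumerate_eq_map_pyRange seats 0]
  have hlen : PySem.List.len seats = (seats.length : Int) := by
    simp [PySem.List.len]
  rw [hlen, PySem.List.pyRange_zero_natCast, List.map_map, List.foldl_map]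
  apply PySem.List.foldl_congr_mem
  intro acc x hx
  have hxn : x < seats.length := List.mem_range.mp hx
  have hd := pv_hd seats x hxn k hk hocc
  simpa only [Function.comp, PySem.List.pyGetD_natCast] using pv_contrib seats x hxn hd acc

theorem pvFold1 (l : List Int) (acc0 : List Int) (d0 : Int) :
    l.foldl (fun (acc : List Int × Int) s =>
        let d := if s ≠ 0 then 0 else acc.2 + 1
        (acc.1 ++ [d], d)) (acc0, d0)
      = (acc0 ++ (List.range l.length).map (fun i => pvDAfter d0 (l.take (i+1))),
         pvDAfter d0 l) := by
  induction l generalizing acc0 d0 with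
  | nil => simp [pvDAfter]
  | cons s tl ih =>
      simp only [List.foldl_cons]
      rw [ih]
      have hmap : (List.range (tl.length + 1)).map
            (fun i => pvDAfter d0 ((s :: tl).take (i+1)))
          = (if s ≠ 0 then 0 else d0 + 1)
            :: (List.range tl.length).map
              (fun i => pvDAfter (if s ≠ 0 then 0 else d0 + 1) (tl.take (i+1))) := by
        rw [List.range_succ_eq_map, List.map_cons, List.map_map]
        have h1 : pvDAfter d0 ((s :: tl).take (0+1)) = (if s ≠ 0 then 0 else d0 + 1) := by
          simp [pvDAfter, pvDStep]
        rw [show (0:Nat) + 1 = 1 from rfl] at h1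
        rw [h1]
        exact congrArg (List.cons _) (List.map_congr_left
          (fun i hi => by simp [pvDAfter, pvDStep, List.take_succ_cons]))
      simp only [List.length_cons, hmap]
      simp [pvDAfter, pvDStep]

theorem pvFold2 (l : List (Int × Int)) (b0 d0 : Int) :
    (l.foldl (fun (st : Int × Int) p =>
        let d := if p.1 ≠ 0 then 0 else st.2 + 1
        (if p.1 = 0 then max st.1 (min p.2 d) else st.1, d)) (b0, d0)).1
      = (List.range l.length).foldl (fun b k =>
          if (l.getD k (1, 0)).1 = 0 then
            max b (min (l.getD k (1, 0)).2 (pvDAfter d0 ((l.map Prod.fst).take (k+1))))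
          else b) b0 := by
  induction l generalizing b0 d0 with
  | nil => simp
  | cons p tl ih =>
      simp only [List.foldl_cons]
      rw [ih]
      rw [List.length_cons, List.range_succ_eq_map, List.foldl_cons, List.foldl_map]
      have hstart : (if ((p :: tl).getD 0 (1, 0)).1 = 0 then
            max b0 (min ((p :: tl).getD 0 (1, 0)).2
              (pvDAfter d0 (((p :: tl).map Prod.fst).take (0+1))))
          else b0)
          = (if p.1 = 0 then max b0 (min p.2 (if p.1 ≠ 0 then 0 else d0 + 1)) else b0) := by
        simp [pvDAfter, pvDStep]
      rw [hstart]
      apply PySem.List.foldl_congr_mem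
      intro acc x hx
      simp [pvDAfter, pvDStep, List.take_succ_cons]

theorem pvB_eq_fold (seats : List Int) :
    maxDistToClosest1_alt seats
      = (List.range seats.length).foldl
          (fun b k => pvStep seats b (seats.length - 1 - k)) 1 := by
  simp only [maxDistToClosest1_alt]
  rw [pvFold1]
  simp only [List.nil_append]
  rw [pvFold2]
  set L := (List.range seats.length).map
      (fun i => pvDAfter (seats.length : Int) (seats.take (i+1))) with hL
  have hlenleft : L.length = seats.length := by rw [hL]; simp
  have hlenzip : (seats.zip L).length = seats.length := by
    rw [List.length_zip, hlenleft, Nat.min_self]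
  have hlen : (seats.zip L).reverse.length = seats.length := by
    rw [List.length_reverse, hlenzip]
  rw [hlen]
  apply PySem.List.foldl_congr_mem
  intro acc x hx
  have hxn : x < seats.length := List.mem_range.mp hx
  have hmapfst : (seats.zip L).reverse.map Prod.fst = seats.reverse := by
    rw [List.map_reverse]
    rw [List.map_fst_zip (by rw [hlenleft])]
  have hgetD : (seats.zip L).reverse.getD x (1, 0)
      = (seats.getD (seats.length - 1 - x) 0, pvLd seats (seats.length - 1 - x)) := by
    have h1 := pv_getD_reverse (seats.zip L) ((1 : Int), (0 : Int)) x
      (by rw [hlenzip]; exact hxn)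
    rw [h1, hlenzip]
    rw [List.getD_eq_getElem (seats.zip L) (1, 0)
      (show seats.length - 1 - x < (seats.zip L).length by rw [hlenzip]; omega)]
    rw [List.getElem_zip]
    refine Prod.ext ?_ ?_
    · simp only
      rw [List.getD_eq_getElem seats 0 (show seats.length - 1 - x < seats.length by omega)]
    · simp only
      simp [hL, pvLd]
  rw [hgetD, hmapfst]
  have htake : pvDAfter (seats.length : Int) (seats.reverse.take (x+1))
      = pvRd seats (seats.length - 1 - x) := by
    have he : seats.length - (seats.length - 1 - x) = x + 1 := by omega
    rw [pvRd, he]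
  rw [htake]
  unfold pvStep pvVal
  rfl

theorem pvRevRange (n : Nat) : (List.range n).map (fun k => n - 1 - k) = (List.range n).reverse := by
  apply List.ext_getElem
  · simp
  · intro k h1 h2
    simp [List.getElem_reverse]

theorem pvStep_rcomm (seats : List Int) (b : Int) (i j : Nat) :
    pvStep seats (pvStep seats b i) j = pvStep seats (pvStep seats b j) i := by
  unfold pvStep
  split_ifs <;> first | rfl | exact max_right_comm _ _ _

theorem maxDistToClosest1_spec : Claim_equal_maxDistToClosest1 := by
  unfold Claim_equal_maxDistToClosest1 Spec_maxDistToClosest1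
  intro seats _ hpre
  rcases hpre with rfl | hany
  · rfl
  · obtain ⟨v, hvmem, hv⟩ := List.any_eq_true.mp hany
    obtain ⟨k, hk, hkv⟩ := List.getElem_of_mem hvmem
    have hocc : seats.getD k 0 ≠ 0 := by
      rw [List.getD_eq_getElem seats 0 hk, hkv]
      simpa using hv
    rw [pvA_eq_fold seats k hk hocc, pvB_eq_fold seats]
    rw [← List.foldl_map (f := fun k => seats.length - 1 - k) (g := pvStep seats)]
    rw [pvRevRange]
    exact (@List.Perm.foldl_eq _ _ (pvStep seats) _ _
      ⟨fun b i j => pvStep_rcomm seats b i j⟩ (List.reverse_perm _) 1).symm
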